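-- pv_equiv track=rewrite | github.com/Mvishal123/DSA | Array/LeftCircularShift.py | second_method
-- ===== SOURCE A (Python) =====
-- def second_method(ls):
--     first = ls[0]
--
--     index = 1
--     while index < len(ls):
--         ls[index - 1] = ls[index]
--         index += 1
--
--     ls[index - 1] = first
--
--     return ls
-- ===== SOURCE B (Python) =====
-- def second_method(ls):
--     first = ls[0]
--     ls[:] = ls[1:] + [first]
--     return ls
-- ===== Notes on version B (the rewrite author's own statement) =====
-- stated objective: idiomatic
-- what changed: Replaces the elementwise index-shifting while loop with a whole-list slice rebuild ls[:] = ls[1:] + [first], keeping the IndexError on an empty list via ls[0].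
import Mathlib
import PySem

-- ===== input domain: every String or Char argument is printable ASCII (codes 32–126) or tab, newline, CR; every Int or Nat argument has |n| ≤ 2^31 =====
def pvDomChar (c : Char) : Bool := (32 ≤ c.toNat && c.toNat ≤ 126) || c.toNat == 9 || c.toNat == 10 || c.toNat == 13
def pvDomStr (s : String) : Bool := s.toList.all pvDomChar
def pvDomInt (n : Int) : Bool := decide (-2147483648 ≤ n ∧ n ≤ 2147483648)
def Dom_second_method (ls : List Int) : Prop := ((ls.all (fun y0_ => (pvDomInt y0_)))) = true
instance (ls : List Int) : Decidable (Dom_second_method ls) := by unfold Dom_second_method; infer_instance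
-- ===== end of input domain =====

-- B rebuilds the list with one slice (ls[1:] + [first]) instead of A's elementwise shifting loop;
-- both mutate ls in place identically, and the equivalence proved is about the return value.

-- ===== PORT A =====
def second_method (ls : List Int) : List Int :=
  match PySem.List.pyGet? ls 0 with
  | none => []   -- Python raises IndexError here; excluded by Pre_
  | some first =>
    let n : Int := ls.length
    let ls' := (PySem.List.pyRange 1 n 1).foldl
      (fun acc index => PySem.List.pySetD acc (index - 1) (PySem.List.pyGetD acc index 0)) ls
    PySem.List.pySetD ls' (n - 1) first

-- ===== PORT B =====
def second_method_alt (ls : List Int) : List Int :=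
  match PySem.List.pyGet? ls 0 with
  | none => []   -- Python raises IndexError here; excluded by Pre_
  | some first => PySem.List.slice ls (some 1) none ++ [first]

-- ===== PRECONDITION & SPEC =====
-- A indexes ls[0] first, so it raises IndexError exactly on the empty list.
def Pre_second_method (ls : List Int) : Prop := ls ≠ []
instance (ls : List Int) : Decidable (Pre_second_method ls) := by unfold Pre_second_method; infer_instance
def pvWitness_second_method : List Int := [3, 1, 2]

def Spec_second_method (ls : List Int) (out : List Int) : Prop := out = second_method_alt ls
instance (ls : List Int) (out : List Int) : Decidable (Spec_second_method ls out) := by unfold Spec_second_method; infer_instance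

-- ===== CLAIM (what is proved, stated in full; the proofs are below) =====
def Claim_equal_second_method : Prop := ∀ (ls : List Int), Dom_second_method ls → Pre_second_method ls → Spec_second_method ls (second_method ls)

-- ===== LEMMAS AND PROOFS =====

-- loop invariant: after the first m iterations the first m slots hold the tail's first m elements
lemma shift_loop (xs : List Int) (m : Nat) (h : m < xs.length) :
    (PySem.List.pyRange 1 (1 + (m : Int)) 1).foldl
      (fun acc index => PySem.List.pySetD acc (index - 1) (PySem.List.pyGetD acc index 0)) xs
    = xs.tail.take m ++ xs.drop m := by
  induction m with
  | zero => simp [PySem.List.pyRange_one_eq_nil]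
  | succ k ih =>
    have hk : k < xs.length := Nat.lt_of_succ_lt h
    rw [show (1 + ((k+1 : Nat) : Int)) = (1 + (k : Int)) + 1 by push_cast; ring,
        PySem.List.pyRange_one_succ_right (by omega), List.foldl_append, ih hk]
    simp only [List.foldl_cons, List.foldl_nil]
    have hA : (xs.tail.take k).length = k := by
      simp [List.length_tail]; omega
    have e1 : (1 + (k:Int)) - 1 = ((k : Nat) : Int) := by push_cast; ring
    have e2 : (1 + (k:Int)) = (((k+1 : Nat)) : Int) := by push_cast; ring
    rw [e1, e2, PySem.List.pySetD_natCast, PySem.List.pyGetD_natCast]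
    have hdrop : xs.drop k = xs[k] :: xs.drop (k+1) := List.drop_eq_getElem_cons hk
    have hacclen : (xs.tail.take k ++ xs.drop k).length = xs.length := by
      simp [List.length_tail]; omega
    have hv : (xs.tail.take k ++ xs.drop k).getD (k+1) 0 = xs[k+1] := by
      rw [List.getD_eq_getElem _ _ (by omega), List.getElem_append_right (by omega)]
      simp only [hA, List.getElem_drop]
      congr 1
      omega
    rw [hv, hdrop, List.set_append_right _ _ (by omega), hA]
    simp only [Nat.sub_self, List.set_cons_zero]
    have htake : xs.tail.take (k+1) = xs.tail.take k ++ [xs[k+1]] := by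
      rw [List.take_add_one]
      have : xs.tail[k]? = some xs[k+1] := by
        rw [List.getElem?_eq_getElem (by simp [List.length_tail]; omega)]
        simp [List.getElem_tail]
      rw [this]; rfl
    rw [htake]
    simp

lemma second_method_eq (a : Int) (t : List Int) :
    second_method (a :: t) = t ++ [a] := by
  have hne : (a :: t) ≠ [] := by simp
  unfold second_method
  have hget : PySem.List.pyGet? (a :: t) 0 = some a := by
    simp [PySem.List.pyGet?, PySem.List.pyIdx?]
  rw [hget]
  have hn : ((a :: t).length : Int) = 1 + ((t.length : Nat) : Int) := by
    simp; ring
  simp only []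
  rw [show (((a :: t).length : Nat) : Int) = 1 + ((t.length : Nat) : Int) by simp; ring]
  rw [shift_loop (a :: t) t.length (by simp)]
  have hdrop : (a :: t).drop t.length = [(a :: t)[t.length]] := by
    rw [List.drop_eq_getElem_cons (by simp)]
    simp only [List.drop_succ_cons, List.drop_length]
    rfl
  rw [hdrop]
  simp only [List.tail_cons]
  have e3 : 1 + ((t.length : Nat) : Int) - 1 = ((t.length : Nat) : Int) := by ring
  rw [e3, PySem.List.pySetD_natCast]
  rw [List.set_append_right _ _ (by simp), List.take_length]
  simp

-- ===== VERDICT (by name: the statement is the Claim_ definition above) =====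
theorem second_method_spec : Claim_equal_second_method := by
  intro ls _ hpre
  cases ls with
  | nil => exact absurd rfl hpre
  | cons a t =>
    show second_method (a :: t) = second_method_alt (a :: t)
    rw [second_method_eq]
    simp [second_method_alt, PySem.List.pyGet?, PySem.List.pyIdx?, PySem.List.slice_from_one]
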